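-- pv_equiv track=rewrite | github.com/Ezte27/FluidSimulator | experiments/spatialLookupHelpers.py | getCellKeys
-- ===== SOURCE A (Python) =====
-- def getCellKeys(screen_width, screen_height, smoothing_radius) -> dict:
--
--     # Dictionary to store cell coordinates and key
--     cellKeys = {}
--
--     # Calculate the number of cells in x and y axis
--     cellsX = screen_width // smoothing_radius
--     cellsY = screen_height // smoothing_radius
--
--     # Loop over all cells inside the screen
--     for row in range(cellsY):
--         for col in range(cellsX):
--             cellKeys[(col, row)] = col + (cellsX * row)
--
--     return cellKeys
-- ===== SOURCE B (Python) =====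
-- def getCellKeys(screen_width, screen_height, smoothing_radius) -> dict:
--     # One linear pass: decode col/row from the linear key k instead of nesting loops.
--     cellsX = screen_width // smoothing_radius
--     cellsY = screen_height // smoothing_radius
--     if cellsX <= 0 or cellsY <= 0:
--         return {}
--     return {(k % cellsX, k // cellsX): k for k in range(cellsX * cellsY)}
-- ===== Notes on version B (the rewrite author's own statement) =====
-- stated objective: alternative
-- what changed: Replaces the nested row/col loops with a single pass over range(cellsX*cellsY), decoding col = k % cellsX and row = k // cellsX (empty grid returned directly when either dimension is nonpositive).
import Mathlib
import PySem

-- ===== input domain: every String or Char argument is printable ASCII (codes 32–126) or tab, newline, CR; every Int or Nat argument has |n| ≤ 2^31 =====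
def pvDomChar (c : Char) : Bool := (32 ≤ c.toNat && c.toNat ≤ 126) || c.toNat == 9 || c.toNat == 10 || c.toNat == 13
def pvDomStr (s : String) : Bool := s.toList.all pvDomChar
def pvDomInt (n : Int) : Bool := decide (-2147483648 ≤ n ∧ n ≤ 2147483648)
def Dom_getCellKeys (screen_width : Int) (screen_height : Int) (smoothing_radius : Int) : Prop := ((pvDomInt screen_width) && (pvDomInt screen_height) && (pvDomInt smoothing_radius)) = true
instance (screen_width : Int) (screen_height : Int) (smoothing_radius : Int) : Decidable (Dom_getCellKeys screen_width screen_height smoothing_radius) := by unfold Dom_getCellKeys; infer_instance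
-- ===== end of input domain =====

-- B replaces A's nested row/col dict-filling loops by one linear pass over range(cellsX*cellsY)
-- with modular decoding of (col,row); same mapping, same insertion order (objective: alternative).

-- ===== PORT A =====
-- Python dict keyed by (col,row) with value k; flattened to (col, row, k) triples at the end
-- to meet the required List (Int × Int × Int) signature.
def getCellKeys (screen_width : Int) (screen_height : Int) (smoothing_radius : Int) : List (Int × Int × Int) :=
  let cellsX := PySem.Int.floordiv screen_width smoothing_radius
  let cellsY := PySem.Int.floordiv screen_height smoothing_radius
  let cellKeys : PySem.Dict (Int × Int) Int :=
    (PySem.List.pyRange 0 cellsY 1).foldl (fun d row =>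
      (PySem.List.pyRange 0 cellsX 1).foldl (fun d col =>
        d.insert (col, row) (col + cellsX * row)) d) PySem.Dict.empty
  cellKeys.items.map (fun p => (p.1.1, p.1.2, p.2))

-- ===== PORT B =====
-- Source B's dict comprehension has pairwise-distinct keys, so the dict is exactly its item list
-- in comprehension order (exact); flattened to triples as above.
def getCellKeys_alt (screen_width : Int) (screen_height : Int) (smoothing_radius : Int) : List (Int × Int × Int) :=
  let cellsX := PySem.Int.floordiv screen_width smoothing_radius
  let cellsY := PySem.Int.floordiv screen_height smoothing_radius
  if cellsX ≤ 0 ∨ cellsY ≤ 0 then []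
  else (PySem.List.pyRange 0 (cellsX * cellsY) 1).map (fun k =>
    (PySem.Int.mod k cellsX, PySem.Int.floordiv k cellsX, k))

-- ===== PRECONDITION & SPEC =====
-- A raises ZeroDivisionError when smoothing_radius = 0; exactly that is excluded, nothing else.
def Pre_getCellKeys (screen_width : Int) (screen_height : Int) (smoothing_radius : Int) : Prop := smoothing_radius ≠ 0
instance (screen_width : Int) (screen_height : Int) (smoothing_radius : Int) : Decidable (Pre_getCellKeys screen_width screen_height smoothing_radius) := by unfold Pre_getCellKeys; infer_instance
def pvWitness_getCellKeys : Int × Int × Int := (6, 4, 2)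

def Spec_getCellKeys (screen_width : Int) (screen_height : Int) (smoothing_radius : Int) (out : List (Int × Int × Int)) : Prop := out = getCellKeys_alt screen_width screen_height smoothing_radius
instance (screen_width : Int) (screen_height : Int) (smoothing_radius : Int) (out : List (Int × Int × Int)) : Decidable (Spec_getCellKeys screen_width screen_height smoothing_radius out) := by unfold Spec_getCellKeys; infer_instance

-- ===== CLAIM (what is proved, stated in full; the proofs are below) =====
def Claim_equal_getCellKeys : Prop := ∀ (screen_width : Int) (screen_height : Int) (smoothing_radius : Int), Dom_getCellKeys screen_width screen_height smoothing_radius → Pre_getCellKeys screen_width screen_height smoothing_radius → Spec_getCellKeys screen_width screen_height smoothing_radius (getCellKeys screen_width screen_height smoothing_radius)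

-- ===== LEMMAS AND PROOFS =====

-- the item list A's dict fold builds for the first n rows
def pvItems (X : Int) (n : Nat) : List ((Int × Int) × Int) :=
  (PySem.List.pyRange 0 (n : Int) 1).flatMap (fun r =>
    (PySem.List.pyRange 0 X 1).map (fun c => ((c, r), c + X * r)))

lemma pvItems_mem_row {X : Int} {n : Nat} {p : (Int × Int) × Int}
    (hp : p ∈ pvItems X n) : p.1.2 < (n : Int) := by
  unfold pvItems at hp
  simp only [List.mem_flatMap, List.mem_map] at hp
  obtain ⟨r, hr, c, _, rfl⟩ := hp
  exact (PySem.List.mem_pyRange_one.mp hr).2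

lemma pvItems_succ (X : Int) (n : Nat) :
    pvItems X (n + 1)
    = pvItems X n ++ (PySem.List.pyRange 0 X 1).map (fun c => ((c, (n : Int)), c + X * n)) := by
  unfold pvItems
  rw [show ((n + 1 : Nat) : Int) = (n : Int) + 1 by push_cast; ring,
      PySem.List.pyRange_one_succ_right (by positivity), List.flatMap_append]
  simp

-- A's dict fold over the first n rows is literally the Dict with item list pvItems X n
lemma pvFold_eq (X : Int) (n : Nat) :
    (PySem.List.pyRange 0 ((n : Int)) 1).foldl (fun d row =>
      (PySem.List.pyRange 0 X 1).foldl (fun d col =>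
        d.insert (col, row) (col + X * row)) d) PySem.Dict.empty
    = PySem.Dict.mk (pvItems X n) := by
  induction n with
  | zero => simp [pvItems, PySem.List.pyRange_one_eq_nil, PySem.Dict.empty]
  | succ n ih =>
    rw [show ((n + 1 : Nat) : Int) = (n : Int) + 1 by push_cast; ring,
        PySem.List.pyRange_one_succ_right (by positivity), List.foldl_append, ih]
    simp only [List.foldl_cons, List.foldl_nil]
    have hfresh : ∀ a ∈ PySem.List.pyRange 0 X 1,
        (PySem.Dict.mk (pvItems X n)).contains ((a, (n : Int)) : Int × Int) = false := by
      intro a _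
      rw [PySem.Dict.contains_eq_decide_mem_keys]
      simp only [decide_eq_false_iff_not, PySem.Dict.keys, List.mem_map]
      rintro ⟨p, hp, hpk⟩
      have h := pvItems_mem_row hp
      rw [hpk] at h
      simp at h
    have hnodup : ((PySem.List.pyRange 0 X 1).map (fun a => ((a, (n : Int)) : Int × Int))).Nodup :=
      List.Nodup.map (fun a b hab => by simpa using congrArg Prod.fst hab) (PySem.List.nodup_pyRange_one 0 X)
    apply PySem.Dict.ext
    rw [PySem.Dict.items_foldl_insert_fresh
      (l := PySem.List.pyRange 0 X 1)
      (k := fun a => ((a, (n : Int)) : Int × Int))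
      (v := fun a => a + X * (n : Int))
      (d := PySem.Dict.mk (pvItems X n)) hfresh hnodup]
    rw [pvItems_succ]

-- with no columns every outer step is the identity, so A's dict stays empty
lemma pvFold_degenerate (X : Int) (hx : X ≤ 0) (l : List Int) (d : PySem.Dict (Int × Int) Int) :
    l.foldl (fun d row =>
      (PySem.List.pyRange 0 X 1).foldl (fun d col =>
        d.insert (col, row) (col + X * row)) d) d = d := by
  simp only [PySem.List.pyRange_one_eq_nil hx, List.foldl_nil]
  exact PySem.List.foldl_ignore l d

-- B's single range, for positive X, is A's flattened item list
lemma pvRange_eq (X : Int) (hX : 0 < X) (n : Nat) :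
    (PySem.List.pyRange 0 (X * (n : Int)) 1).map (fun k =>
      (PySem.Int.mod k X, PySem.Int.floordiv k X, k))
    = (pvItems X n).map (fun p => (p.1.1, p.1.2, p.2)) := by
  induction n with
  | zero => simp [pvItems, PySem.List.pyRange_one_eq_nil]
  | succ n ih =>
    have h0 : (0 : Int) ≤ X * n := by positivity
    have h1 : X * (n : Int) ≤ X * ((n + 1 : Nat) : Int) := by push_cast; nlinarith
    rw [PySem.List.pyRange_one_append 0 (X * (n : Int)) (X * ((n + 1 : Nat) : Int)) h0 h1,
        List.map_append, ih, pvItems_succ, List.map_append]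
    congr 1
    -- the new chunk: k = X*n + j for j ∈ [0, X)
    rw [PySem.List.pyRange_one (X * (n : Int)) (X * ((n + 1 : Nat) : Int)) ,
        PySem.List.pyRange_one 0 X]
    have hlen : (X * ((n + 1 : Nat) : Int) - X * (n : Int)).toNat = (X - 0).toNat := by
      push_cast; congr 1; ring
    rw [hlen, List.map_map, List.map_map, List.map_map]
    apply List.map_congr_left
    intro j hj
    have hjX : (j : Int) < X := by
      have := List.mem_range.mp hj
      omega
    have hj0 : (0 : Int) ≤ (j : Int) := by positivity
    simp only [Function.comp]
    have hmod : PySem.Int.mod (X * (n : Int) + (j : Int)) X = (j : Int) := by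
      rw [PySem.Int.mod_eq_emod_of_pos hX]
      rw [show X * (n : Int) + (j : Int) = (j : Int) + X * (n : Int) by ring,
          Int.add_mul_emod_self_left]
      exact Int.emod_eq_of_lt hj0 hjX
    have hdiv : PySem.Int.floordiv (X * (n : Int) + (j : Int)) X = (n : Int) := by
      rw [PySem.Int.floordiv_eq_ediv_of_pos hX]
      rw [show X * (n : Int) + (j : Int) = (j : Int) + (n : Int) * X by ring,
          Int.add_mul_ediv_right _ _ (by omega : X ≠ 0),
          Int.ediv_eq_zero_of_lt hj0 hjX]
      ring
    simp [hmod, hdiv]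
    ring

-- ===== VERDICT (by name: the statement is the Claim_ definition above) =====
theorem getCellKeys_spec : Claim_equal_getCellKeys := by
  intro w h r _ hr
  unfold Spec_getCellKeys getCellKeys getCellKeys_alt
  set X := PySem.Int.floordiv w r with hX
  set Y := PySem.Int.floordiv h r with hY
  simp only
  by_cases hdeg : X ≤ 0 ∨ Y ≤ 0
  · rw [if_pos hdeg]
    rcases hdeg with hx | hy
    · rw [pvFold_degenerate X hx]
      rfl
    · rw [PySem.List.pyRange_one_eq_nil hy]
      rfl
  · rw [if_neg hdeg]
    rw [not_or, not_le, not_le] at hdeg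
    obtain ⟨hx, hy⟩ := hdeg
    have hYn : Y = ((Y.toNat : Nat) : Int) := (Int.toNat_of_nonneg (le_of_lt hy)).symm
    rw [hYn, pvFold_eq X Y.toNat, ← pvRange_eq X hx Y.toNat]
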